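-- pv_equiv track=rewrite | github.com/adrianocvieira/desafios | 50dias/python/33.py | RemoveCensuraTexto
-- ===== SOURCE A (Python) =====
-- def RemoveCensuraTexto(textoCensurado, vogais):
--     contadorVogais = 0
--     textoOriginal = ""
--     for i in range(len(textoCensurado)):
--         if textoCensurado[i] == '*':
--             textoOriginal += vogais[contadorVogais]
--             contadorVogais += 1
--         else:
--             textoOriginal += textoCensurado[i]
--     return textoOriginal
-- ===== SOURCE B (Python) =====
-- def RemoveCensuraTexto(textoCensurado, vogais):
--     parts = textoCensurado.split('*')
--     gaps = [vogais[i] for i in range(len(parts) - 1)]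
--     return parts[0] + ''.join(v + p for v, p in zip(gaps, parts[1:]))
-- ===== Notes on version B (the rewrite author's own statement) =====
-- stated objective: faster
-- what changed: B is staged: it splits the text on '*' once, selects the needed vowels by index in a comprehension, and joins segments and vowels with zip+join, replacing A's per-character scan with a running vowel counter and quadratic string concatenation.
import Mathlib
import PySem

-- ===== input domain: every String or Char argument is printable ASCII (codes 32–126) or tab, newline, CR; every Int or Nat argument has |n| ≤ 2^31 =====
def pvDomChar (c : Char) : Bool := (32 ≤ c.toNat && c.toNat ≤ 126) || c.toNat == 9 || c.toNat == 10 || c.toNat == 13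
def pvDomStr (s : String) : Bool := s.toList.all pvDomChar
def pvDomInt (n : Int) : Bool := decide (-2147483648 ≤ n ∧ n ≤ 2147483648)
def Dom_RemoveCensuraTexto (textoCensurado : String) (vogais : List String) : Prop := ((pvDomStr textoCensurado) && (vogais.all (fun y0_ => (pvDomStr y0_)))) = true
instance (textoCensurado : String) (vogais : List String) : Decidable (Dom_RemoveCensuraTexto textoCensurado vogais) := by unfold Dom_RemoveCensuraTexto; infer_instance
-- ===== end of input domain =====

-- B is staged (split on '*', select vowels by index, zip+join) instead of A's per-character
-- scan with a running vowel counter and += string accumulation; objective: faster (measured).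

-- ===== PORT A =====
-- A's for-loop over the characters of textoCensurado with state (contadorVogais, textoOriginal);
-- vogais[contadorVogais] is PySem.List.pyGet? — none = IndexError, propagated as none.
def pvGoA (vogais : List String) : List Char → Nat → List Char → Option (List Char)
  | [], _, acc => some acc
  | c :: rest, k, acc =>
    if c = '*' then
      match PySem.List.pyGet? vogais (k : Int) with
      | none => none
      | some v => pvGoA vogais rest (k + 1) (acc ++ v.toList)
    else pvGoA vogais rest k (acc ++ [c])

def RemoveCensuraTexto (textoCensurado : String) (vogais : List String) : String :=
  match pvGoA vogais textoCensurado.toList 0 [] with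
  | some r => String.ofList r
  | none => ""   -- unreachable under Pre_ (the Python raises IndexError here)

-- ===== PORT B =====
-- parts = textoCensurado.split('*'); gaps = [vogais[i] for i in range(len(parts)-1)]  (IndexError → none);
-- parts[0] + ''.join(v + p for v, p in zip(gaps, parts[1:])).
def RemoveCensuraTexto_alt (textoCensurado : String) (vogais : List String) : String :=
  let parts := PySem.Chars.splitOn textoCensurado.toList ['*']
  match (PySem.List.pyRange 0 ((parts.length : Int) - 1) 1).mapM
          (fun i => PySem.List.pyGet? vogais i) with
  | none => ""   -- unreachable under Pre_ (the Python raises IndexError here)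
  | some gaps =>
      String.ofList (parts.headD [] ++
        ((gaps.zip parts.tail).map (fun vp => vp.1.toList ++ vp.2)).flatten)

-- ===== PRECONDITION & SPEC =====
-- Pre_ excludes exactly the inputs where A (and B too) raises IndexError: fewer vowels than asterisks.
def Pre_RemoveCensuraTexto (textoCensurado : String) (vogais : List String) : Prop :=
  textoCensurado.toList.count '*' ≤ vogais.length
instance (textoCensurado : String) (vogais : List String) : Decidable (Pre_RemoveCensuraTexto textoCensurado vogais) := by unfold Pre_RemoveCensuraTexto; infer_instance
def pvWitness_RemoveCensuraTexto : String × List String := ("h*ll* w*rld", ["e", "o", "o"])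

def Spec_RemoveCensuraTexto (textoCensurado : String) (vogais : List String) (out : String) : Prop := out = RemoveCensuraTexto_alt textoCensurado vogais
instance (textoCensurado : String) (vogais : List String) (out : String) : Decidable (Spec_RemoveCensuraTexto textoCensurado vogais out) := by unfold Spec_RemoveCensuraTexto; infer_instance

-- ===== CLAIM (what is proved, stated in full; the proofs are below) =====
def Claim_equal_RemoveCensuraTexto : Prop := ∀ (textoCensurado : String) (vogais : List String), Dom_RemoveCensuraTexto textoCensurado vogais → Pre_RemoveCensuraTexto textoCensurado vogais → Spec_RemoveCensuraTexto textoCensurado vogais (RemoveCensuraTexto textoCensurado vogais)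

-- ===== LEMMAS AND PROOFS =====

-- reference split on '*' (proof helper only)
def pvSplit : List Char → List (List Char)
  | [] => [[]]
  | c :: cs => if c = '*' then [] :: pvSplit cs else (pvSplit cs).modifyHead (c :: ·)

-- reference interleaving: vowels from index k between the segments (proof helper only)
def pvBuild (vogais : List String) : Nat → List (List Char) → Option (List Char)
  | _, [] => some []
  | k, p :: ps =>
    match PySem.List.pyGet? vogais (k : Int) with
    | none => none
    | some v => (pvBuild vogais (k + 1) ps).map (fun r => v.toList ++ p ++ r)

theorem pvSplit_ne_nil (cs : List Char) : pvSplit cs ≠ [] := by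
  induction cs with
  | nil => simp [pvSplit]
  | cons c cs ih =>
    simp only [pvSplit]
    split
    · simp
    · cases h : pvSplit cs with
      | nil => exact absurd h ih
      | cons p ps => simp

theorem pvGo_spec (fuel : Nat) : ∀ (l cur : List Char) (acc : List (List Char)), l.length ≤ fuel →
    PySem.Chars.splitOn.go ['*'] fuel l cur acc
      = acc.reverse ++ ((cur.reverse ++ (pvSplit l).headD []) :: (pvSplit l).tail) := by
  induction fuel with
  | zero =>
    intro l cur acc h
    have : l = [] := List.length_eq_zero_iff.mp (Nat.le_zero.mp h)
    subst this
    simp [PySem.Chars.splitOn.go, pvSplit]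
  | succ fuel ih =>
    intro l cur acc h
    cases l with
    | nil => simp [PySem.Chars.splitOn.go, pvSplit]
    | cons c rest =>
      obtain ⟨p, ps, hps⟩ := List.exists_cons_of_ne_nil (pvSplit_ne_nil rest)
      have hr : rest.length ≤ fuel := by simpa using h
      by_cases hc : c = '*'
      · subst hc
        have hpre : List.isPrefixOf ['*'] ('*' :: rest) = true := by
          simp [List.isPrefixOf]
        simp only [PySem.Chars.splitOn.go, hpre, if_pos]
        rw [show (List.drop ['*'].length ('*' :: rest)) = rest by simp]
        rw [ih rest [] _ hr]
        simp [pvSplit, hps]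
      · have hpre : List.isPrefixOf ['*'] (c :: rest) = false := by
          simp [List.isPrefixOf]
          exact fun h' => hc h'.symm
        simp only [PySem.Chars.splitOn.go, hpre, Bool.false_eq_true, if_false]
        rw [ih rest (c :: cur) _ hr]
        simp [pvSplit, hc, hps]

theorem pvSplitOn_eq (cs : List Char) : PySem.Chars.splitOn cs ['*'] = pvSplit cs := by
  obtain ⟨p, ps, hps⟩ := List.exists_cons_of_ne_nil (pvSplit_ne_nil cs)
  rw [PySem.Chars.splitOn, pvGo_spec (cs.length + 1) cs [] [] (by omega)]
  simp [hps]

-- A's scan equals the interleaving of A's split segments (by induction on the text)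
theorem pvA_key (vogais : List String) (cs : List Char) : ∀ (k : Nat) (acc : List Char),
    pvGoA vogais cs k acc
      = (pvBuild vogais k (pvSplit cs).tail).map
          (fun r => acc ++ (pvSplit cs).headD [] ++ r) := by
  induction cs with
  | nil => intro k acc; simp [pvGoA, pvBuild, pvSplit]
  | cons c rest ih =>
    intro k acc
    obtain ⟨p, ps, hps⟩ := List.exists_cons_of_ne_nil (pvSplit_ne_nil rest)
    by_cases hc : c = '*'
    · subst hc
      simp only [pvGoA, if_pos, pvSplit, hps, List.tail_cons, List.headD_cons, pvBuild]
      cases PySem.List.pyGet? vogais (k : Int) with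
      | none => rfl
      | some v =>
        dsimp only
        rw [ih (k + 1) (acc ++ v.toList)]
        cases h : pvBuild vogais (k + 1) ps <;> simp [hps, h]
    · simp only [pvGoA, hc, if_false, pvSplit, hps]
      rw [ih k (acc ++ [c])]
      cases h : pvBuild vogais k ps <;> simp [hps, h]

-- B's staged computation (range-mapM then zip) equals the same interleaving
theorem pvB_key (vogais : List String) (ps : List (List Char)) : ∀ (k : Nat),
    pvBuild vogais k ps
      = ((PySem.List.pyRange (k : Int) ((k : Int) + ps.length) 1).mapM
           (fun i => PySem.List.pyGet? vogais i)).map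
          (fun gaps => ((gaps.zip ps).map (fun vp => vp.1.toList ++ vp.2)).flatten) := by
  induction ps with
  | nil => intro k; simp [pvBuild, PySem.List.pyRange_one_eq_nil, List.mapM_nil]
  | cons p ps ih =>
    intro k
    rw [PySem.List.pyRange_one_cons (by push_cast [List.length_cons]; omega)]
    rw [show ((k : Int) + 1) = ((k + 1 : Nat) : Int) by push_cast; ring]
    rw [show (k : Int) + ((p :: ps).length : Int) = ((k + 1 : Nat) : Int) + (ps.length : Int) by push_cast; simp; ring]
    simp only [pvBuild, List.mapM_cons]
    cases PySem.List.pyGet? vogais (k : Int) with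
    | none => rfl
    | some v =>
      rw [ih (k + 1)]
      cases (PySem.List.pyRange ((k + 1 : Nat) : Int) (((k + 1 : Nat) : Int) + ps.length) 1).mapM
              (fun i => PySem.List.pyGet? vogais i) with
      | none => rfl
      | some gaps => simp

-- ===== VERDICT (by name: the statement is the Claim_ definition above) =====
theorem RemoveCensuraTexto_spec : Claim_equal_RemoveCensuraTexto := by
  intro textoCensurado vogais _ _
  show RemoveCensuraTexto textoCensurado vogais = RemoveCensuraTexto_alt textoCensurado vogais
  rw [RemoveCensuraTexto, RemoveCensuraTexto_alt]
  obtain ⟨p, ps, hps⟩ := List.exists_cons_of_ne_nil (pvSplit_ne_nil textoCensurado.toList)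
  rw [pvA_key vogais textoCensurado.toList 0 []]
  simp only [pvSplitOn_eq, hps, List.tail_cons, List.headD_cons, List.length_cons]
  have hb := pvB_key vogais ps 0
  simp only [Nat.cast_zero, zero_add] at hb
  rw [show (((ps.length + 1 : Nat) : Int) - 1) = (ps.length : Int) by push_cast; ring]
  rw [hb]
  cases h : (PySem.List.pyRange 0 (ps.length : Int) 1).mapM (fun i => PySem.List.pyGet? vogais i) <;> simp
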